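-- pv_equiv track=rewrite | github.com/spinningD20/foobar_favorites | zombit_infection.py | answer
-- ===== SOURCE A (Python) =====
-- def answer(population, patient_x, patient_y, strength):
--
--     def is_susceptible(y, x):
--         resistance = population[y][x]
--         return resistance <= strength
--
--     def is_in_bounds(y, x):
--         try:
--             return True if x in range(0, (len(population[y]))) and y in range(0, (len(population))) else False
--         except IndexError:
--             return False
--
--     def get_susceptible_rabbits(y, x):
--         susceptible_rabbits = list()
--         coords = list([[y, x-1], [y, x+1], [y-1, x], [y+1, x]])
--         for (y, x) in coords:
--             if is_in_bounds(y, x) and is_susceptible(y, x) and not already_infected(y, x):  # check left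
--                 susceptible_rabbits.append([y, x])
--         return susceptible_rabbits
--
--     def make_infected(y, x):
--         population[y][x] = -1
--
--     def already_infected(y, x):
--         return population[y][x] == -1
--
--     def spread_from(biter):
--         for victim in get_susceptible_rabbits(*biter):
--             make_infected(*victim)
--             spread_from(victim)
--
--     def inject(patient):
--         if is_susceptible(*patient):
--             make_infected(*patient)
--             spread_from(patient)
--
--     patient_z = [patient_y, patient_x]
--     inject(patient_z)
--     return population
-- ===== SOURCE B (Python) =====
-- def answer(population, patient_x, patient_y, strength):
--     # Iterative flood fill with an explicit stack instead of A's recursion.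
--     if population[patient_y][patient_x] <= strength:
--         population[patient_y][patient_x] = -1
--         stack = [(patient_y, patient_x)]
--         while stack:
--             y, x = stack.pop()
--             for ny, nx in ((y, x - 1), (y, x + 1), (y - 1, x), (y + 1, x)):
--                 if (0 <= ny < len(population) and 0 <= nx < len(population[ny])
--                         and population[ny][nx] != -1 and population[ny][nx] <= strength):
--                     population[ny][nx] = -1
--                     stack.append((ny, nx))
--     return population
-- ===== Notes on version B (the rewrite author's own statement) =====
-- stated objective: alternative
-- what changed: Replaced A's recursive flood fill (helper predicates plus per-victim recursion with re-scanning of neighbours after each recursive call) by an iterative flood fill with an explicit stack that marks each cell infected at push time.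
import Mathlib
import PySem

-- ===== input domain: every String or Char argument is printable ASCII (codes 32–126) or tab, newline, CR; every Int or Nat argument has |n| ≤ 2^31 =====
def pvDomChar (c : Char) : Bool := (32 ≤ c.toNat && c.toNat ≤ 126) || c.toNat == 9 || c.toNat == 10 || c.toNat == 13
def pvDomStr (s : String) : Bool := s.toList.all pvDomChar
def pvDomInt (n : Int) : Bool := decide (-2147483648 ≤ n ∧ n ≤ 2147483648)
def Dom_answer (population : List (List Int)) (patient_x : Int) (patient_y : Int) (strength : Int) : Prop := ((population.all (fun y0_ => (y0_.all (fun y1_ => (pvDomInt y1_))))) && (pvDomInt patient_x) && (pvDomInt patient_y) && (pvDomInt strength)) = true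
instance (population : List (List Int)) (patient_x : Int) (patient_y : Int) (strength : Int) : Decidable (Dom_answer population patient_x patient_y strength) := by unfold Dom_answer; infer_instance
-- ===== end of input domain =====

-- B replaces A's recursive flood fill by an iterative one with an explicit stack (same return value;
-- both Pythons mutate `population` in place — the equivalence proved here is about the return value).

-- ===== PORT A =====

-- shared primitive: Python's `g[y][x] = v` (row fetched, mutated in place, written back);
-- exact wherever the indices are valid, and both programs only assign at valid indices
def gridSet (g : List (List Int)) (y x v : Int) : List (List Int) :=
  PySem.List.pySetD g y (PySem.List.pySetD (PySem.List.pyGetD g y []) x v)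

-- is_in_bounds: `population[y]` may raise IndexError (caught → False), then the two range tests
def inBoundsA (g : List (List Int)) (y x : Int) : Bool :=
  match PySem.List.pyGet? g y with
  | none => false
  | some row => decide (0 ≤ x ∧ x < (row.length : Int)) && decide (0 ≤ y ∧ y < (g.length : Int))

-- population[y][x] (only consulted behind the bounds check, where pyGetD is exact)
def cellA (g : List (List Int)) (y x : Int) : Int :=
  PySem.List.pyGetD (PySem.List.pyGetD g y []) x 0

-- get_susceptible_rabbits: the four candidate coords filtered by in-bounds, susceptible, not -1
def susRabbits (g : List (List Int)) (strength y x : Int) : List (Int × Int) :=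
  ([(y, x-1), (y, x+1), (y-1, x), (y+1, x)]).filter
    (fun p => inBoundsA g p.1 p.2 && decide (cellA g p.1 p.2 ≤ strength) && !(cellA g p.1 p.2 == -1))

-- spread_from: list computed once from the entry grid, then each victim marked and recursed on.
-- The Nat argument is a fuel guard for totality only; `answer` passes more fuel than the
-- recursion can ever consume (the proofs below establish that bound).
def spreadA (strength : Int) : Nat → List (List Int) → Int → Int → List (List Int)
  | 0, g, _, _ => g
  | n+1, g, y, x =>
      (susRabbits g strength y x).foldl
        (fun gc p => spreadA strength n (gridSet gc p.1 p.2 (-1)) p.1 p.2) g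

-- inject + return population; population[patient_y][patient_x] raises IndexError outside Pre_
def answer (population : List (List Int)) (patient_x : Int) (patient_y : Int) (strength : Int) : List (List Int) :=
  match (PySem.List.pyGet? population patient_y).bind (fun r => PySem.List.pyGet? r patient_x) with
  | none => population
  | some r =>
      if r ≤ strength then
        spreadA strength ((population.map List.length).sum + 2)
          (gridSet population patient_y patient_x (-1)) patient_y patient_x
      else population

-- ===== PORT B =====

-- B's single neighbour test: bounds, not already -1, below the strength threshold
def eligB (g : List (List Int)) (strength y x : Int) : Bool :=
  decide (0 ≤ y ∧ y < (g.length : Int)) &&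
  (decide (0 ≤ x ∧ x < ((PySem.List.pyGetD g y []).length : Int)) &&
   (!(PySem.List.pyGetD (PySem.List.pyGetD g y []) x 0 == -1) &&
    decide (PySem.List.pyGetD (PySem.List.pyGetD g y []) x 0 ≤ strength)))

-- B's while loop; the stack is kept most-recent-first (cons = Python append+pop at the tail).
-- Fuel guard for totality only, as in port A.
def loopB (strength : Int) : Nat → List (List Int) → List (Int × Int) → List (List Int)
  | 0, g, _ => g
  | _+1, g, [] => g
  | n+1, g, (y, x) :: rest =>
      let st := ([(y, x-1), (y, x+1), (y-1, x), (y+1, x)]).foldl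
        (fun (st : List (List Int) × List (Int × Int)) p =>
          if eligB st.1 strength p.1 p.2 then (gridSet st.1 p.1 p.2 (-1), p :: st.2) else st)
        (g, rest)
      loopB strength n st.1 st.2

def answer_alt (population : List (List Int)) (patient_x : Int) (patient_y : Int) (strength : Int) : List (List Int) :=
  match (PySem.List.pyGet? population patient_y).bind (fun r => PySem.List.pyGet? r patient_x) with
  | none => population
  | some r =>
      if r ≤ strength then
        loopB strength ((population.map List.length).sum + 2)
          (gridSet population patient_y patient_x (-1)) [(patient_y, patient_x)]
      else population

-- ===== PRECONDITION & SPEC =====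
-- Pre_ excludes exactly the inputs where Python's `population[patient_y][patient_x]` raises IndexError.
def Pre_answer (population : List (List Int)) (patient_x : Int) (patient_y : Int) (strength : Int) : Prop :=
  ((PySem.List.pyGet? population patient_y).bind (fun r => PySem.List.pyGet? r patient_x)).isSome = true
instance (population : List (List Int)) (patient_x : Int) (patient_y : Int) (strength : Int) : Decidable (Pre_answer population patient_x patient_y strength) := by unfold Pre_answer; infer_instance

def pvWitness_answer : List (List Int) × Int × Int × Int := ([[0, 2], [3, 0]], 0, 0, 1)

def Spec_answer (population : List (List Int)) (patient_x : Int) (patient_y : Int) (strength : Int) (out : List (List Int)) : Prop := out = answer_alt population patient_x patient_y strength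
instance (population : List (List Int)) (patient_x : Int) (patient_y : Int) (strength : Int) (out : List (List Int)) : Decidable (Spec_answer population patient_x patient_y strength out) := by unfold Spec_answer; infer_instance

-- ===== CLAIM (what is proved, stated in full; the proofs are below) =====
def Claim_equal_answer : Prop := ∀ (population : List (List Int)) (patient_x : Int) (patient_y : Int) (strength : Int), Dom_answer population patient_x patient_y strength → Pre_answer population patient_x patient_y strength → Spec_answer population patient_x patient_y strength (answer population patient_x patient_y strength)

-- ===== LEMMAS AND PROOFS =====

-- The four orthogonal neighbours of a cell, in both programs' visiting order
def nbrsP (p : Int × Int) : List (Int × Int) := [(p.1, p.2-1), (p.1, p.2+1), (p.1-1, p.2), (p.1+1, p.2)]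

def rowOf (g : List (List Int)) (y : Int) : List Int := PySem.List.pyGetD g y []

def valP (g : List (List Int)) (p : Int × Int) : Int := PySem.List.pyGetD (rowOf g p.1) p.2 0

def inbP (g1 : List (List Int)) (p : Int × Int) : Prop :=
  0 ≤ p.1 ∧ p.1 < (g1.length : Int) ∧ 0 ≤ p.2 ∧ p.2 < ((rowOf g1 p.1).length : Int)

def eligP (g1 : List (List Int)) (strength : Int) (p : Int × Int) : Prop :=
  inbP g1 p ∧ valP g1 p ≤ strength ∧ valP g1 p ≠ -1

-- cells reachable from the start through susceptible not-yet-infected cells of the start grid g1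
inductive ReachP (g1 : List (List Int)) (strength : Int) (s : Int × Int) : Int × Int → Prop
  | base : ReachP g1 strength s s
  | step {p q : Int × Int} : ReachP g1 strength s p → q ∈ nbrsP p → eligP g1 strength q → ReachP g1 strength s q

-- same shape as g1
def dimsEq (g1 g : List (List Int)) : Prop :=
  g.length = g1.length ∧ ∀ i : Nat, i < g1.length → (rowOf g (i : Int)).length = (rowOf g1 (i : Int)).length

-- ghost-state relation: g is g1 with exactly the in-bounds cells of M overwritten by -1
def StG (g1 : List (List Int)) (M : Set (Int × Int)) (g : List (List Int)) : Prop :=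
  dimsEq g1 g ∧ ∀ p : Int × Int, inbP g1 p →
    (p ∈ M → valP g p = -1) ∧ (p ∉ M → valP g p = valP g1 p)


-- potential: number of cells still different from -1
def muG (g : List (List Int)) : Nat := (g.map (fun r => r.countP (fun v => !(v == -1)))).sum

lemma sum_map_set {α : Type} (f : α → Nat) : ∀ (l : List α) (i : Nat) (a : α) (h : i < l.length),
    ((l.set i a).map f).sum + f l[i] = (l.map f).sum + f a := by
  intro l
  induction l with
  | nil => intro i a h; simp at h
  | cons x xs ih =>
    intro i a h
    cases i with
    | zero => simp [List.set]; omega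
    | succ n =>
      simp only [List.set_cons_succ, List.map, List.sum_cons, List.getElem_cons_succ]
      have := ih n a (by simpa using h)
      omega

lemma countP_set' (f : Int → Bool) : ∀ (l : List Int) (i : Nat) (v : Int) (h : i < l.length),
    (l.set i v).countP f + (if f l[i] then 1 else 0) = l.countP f + (if f v then 1 else 0) := by
  intro l
  induction l with
  | nil => intro i v h; simp at h
  | cons x xs ih =>
    intro i v h
    cases i with
    | zero =>
      simp only [List.set_cons_zero, List.countP_cons, List.getElem_cons_zero]
      split_ifs <;> simp_all
    | succ n =>
      simp only [List.set_cons_succ, List.countP_cons, List.getElem_cons_succ]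
      have := ih n v (by simpa using h)
      split_ifs at * <;> omega


lemma rowOf_eq_getElem (g : List (List Int)) (i : Nat) (h : i < g.length) :
    rowOf g (i : Int) = g[i] := by
  simp [rowOf, List.getElem?_eq_getElem h]

lemma valP_eq_getElem (g : List (List Int)) (i j : Nat) (hi : i < g.length) (hj : j < g[i].length) :
    valP g ((i : Int), (j : Int)) = g[i][j] := by
  simp [valP, rowOf_eq_getElem g i hi, List.getElem?_eq_getElem hj]

lemma StG_unique {g1 ga gb : List (List Int)} {M : Set (Int × Int)}
    (ha : StG g1 M ga) (hb : StG g1 M gb) : ga = gb := by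
  obtain ⟨⟨hal, har⟩, hav⟩ := ha
  obtain ⟨⟨hbl, hbr⟩, hbv⟩ := hb
  apply List.ext_getElem (by omega)
  intro i hia hib
  have hi1 : i < g1.length := by omega
  have hra := har i hi1
  have hrb := hbr i hi1
  rw [rowOf_eq_getElem ga i hia, rowOf_eq_getElem g1 i hi1] at hra
  rw [rowOf_eq_getElem gb i hib, rowOf_eq_getElem g1 i hi1] at hrb
  apply List.ext_getElem (by omega)
  intro j hja hjb
  have hj1 : j < g1[i].length := by omega
  have hinb : inbP g1 ((i : Int), (j : Int)) := by
    simp only [inbP, rowOf_eq_getElem g1 i hi1]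
    refine ⟨by positivity, by exact_mod_cast hi1, by positivity, by exact_mod_cast hj1⟩
  have h2a := hav _ hinb
  have h2b := hbv _ hinb
  rw [valP_eq_getElem ga i j hia hja] at h2a
  rw [valP_eq_getElem gb i j hib hjb] at h2b
  by_cases hm : ((i : Int), (j : Int)) ∈ M
  · rw [h2a.1 hm, h2b.1 hm]
  · rw [h2a.2 hm, h2b.2 hm]

lemma dimsEq_refl (g : List (List Int)) : dimsEq g g := ⟨rfl, fun _ _ => rfl⟩

lemma dimsEq_trans {g1 g2 g3 : List (List Int)} (h12 : dimsEq g1 g2) (h23 : dimsEq g2 g3) :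
    dimsEq g1 g3 := by
  refine ⟨h23.1.trans h12.1, fun i hi => ?_⟩
  have h2 : i < g2.length := by rw [h12.1]; exact hi
  rw [h23.2 i h2, h12.2 i hi]

lemma pySetD_oob {α : Type} (xs : List α) (i : Int) (v : α) (h : ¬ PySem.Raise.InRange xs.length i) :
    PySem.List.pySetD xs i v = xs := by
  rw [PySem.List.pySetD, (PySem.List.pySet?_eq_none_iff xs i v).mpr h]; rfl

lemma pySetD_neg {α : Type} (xs : List α) (k : Nat) (v : α) (h0 : 0 < k) (h : k ≤ xs.length) :
    PySem.List.pySetD xs (-(k:Int)) v = xs.set (xs.length - k) v := by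
  simp [PySem.List.pySetD, PySem.List.pySet?, PySem.List.pyIdx?, h, h0.ne']

-- gridSet either leaves the grid unchanged or rewrites one row in place
lemma gridSet_cases (g : List (List Int)) (y x v : Int) :
    gridSet g y x v = g ∨ ∃ (m : Nat) (hm : m < g.length),
      gridSet g y x v = g.set m (PySem.List.pySetD (g[m]) x v) := by
  by_cases hin : PySem.Raise.InRange g.length y
  · right
    have hin' : -(g.length : Int) ≤ y ∧ y < g.length := by
      simpa [PySem.Raise.InRange] using hin
    by_cases hy : 0 ≤ y
    · refine ⟨y.toNat, by omega, ?_⟩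
      rw [gridSet, PySem.List.pySetD_of_nonneg g _ hy,
        PySem.List.pyGetD_eq_getElem g _ hy (by omega)]
    · obtain ⟨k, rfl⟩ : ∃ k : Nat, y = -(k : Int) := ⟨(-y).toNat, by omega⟩
      have hk0 : 0 < k := by omega
      have hkl : k ≤ g.length := by omega
      refine ⟨g.length - k, by omega, ?_⟩
      rw [gridSet, pySetD_neg g _ _ hk0 hkl, PySem.List.pyGetD_neg_natCast g _ _ hk0 hkl]
  · left
    rw [gridSet, pySetD_oob _ _ _ (by simpa using hin)]

lemma dimsEq_gridSet_self (g : List (List Int)) (y x v : Int) :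
    dimsEq g (gridSet g y x v) := by
  rcases gridSet_cases g y x v with h | ⟨m, hm, h⟩
  · rw [h]; exact dimsEq_refl g
  · rw [h]
    refine ⟨by simp, fun i hi => ?_⟩
    rw [rowOf_eq_getElem _ i (by simpa using hi), rowOf_eq_getElem g i hi,
      List.getElem_set]
    split
    · next heq => subst heq; exact PySem.List.length_pySetD ..
    · rfl

lemma dimsEq_gridSet {g1 g : List (List Int)} (hd : dimsEq g1 g) (p : Int × Int) (v : Int) :
    dimsEq g1 (gridSet g p.1 p.2 v) :=
  dimsEq_trans hd (dimsEq_gridSet_self g p.1 p.2 v)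

-- gridSet at valid nonnegative coordinates is List.set of List.set
lemma gridSet_eq_set (g : List (List Int)) (y x v : Int) (hy0 : 0 ≤ y) (hy : y < (g.length : Int))
    (hx0 : 0 ≤ x) :
    gridSet g y x v = g.set y.toNat ((g[y.toNat]'(by omega)).set x.toNat v) := by
  rw [gridSet, PySem.List.pySetD_of_nonneg g _ hy0,
    PySem.List.pyGetD_eq_getElem g _ hy0 (by simpa using hy),
    PySem.List.pySetD_of_nonneg _ _ hx0]

lemma valP_gridSet {g1 g : List (List Int)} (hd : dimsEq g1 g) {p : Int × Int}
    (hp : inbP g1 p) (q : Int × Int) (hq : inbP g1 q) (v : Int) :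
    valP (gridSet g p.1 p.2 v) q = if q = p then v else valP g q := by
  obtain ⟨hp1, hp2, hp3, hp4⟩ := hp
  obtain ⟨hq1, hq2, hq3, hq4⟩ := hq
  have hlen : g.length = g1.length := hd.1
  have hpi : p.1.toNat < g.length := by omega
  have hqi : q.1.toNat < g.length := by omega
  have hcastq : ((q.1.toNat : Nat) : Int) = q.1 := by omega
  have hcastp : ((p.1.toNat : Nat) : Int) = p.1 := by omega
  have hrowq : (g[q.1.toNat]).length = (rowOf g1 q.1).length := by
    have h2 := hd.2 q.1.toNat (by omega)
    rw [rowOf_eq_getElem g _ hqi, hcastq] at h2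
    exact h2
  have hrowp : (g[p.1.toNat]).length = (rowOf g1 p.1).length := by
    have h2 := hd.2 p.1.toNat (by omega)
    rw [rowOf_eq_getElem g _ hpi, hcastp] at h2
    exact h2
  rw [gridSet_eq_set g p.1 p.2 v hp1 (by omega) hp3]
  unfold valP rowOf
  rw [PySem.List.pyGetD_eq_getElem _ _ hq1 (by simp only [List.length_set]; omega),
    List.getElem_set]
  by_cases hyy : q.1 = p.1
  · have hnn : p.1.toNat = q.1.toNat := by omega
    rw [if_pos hnn]
    have hle : (rowOf g1 q.1).length = (rowOf g1 p.1).length := by rw [hyy]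
    rw [PySem.List.pyGetD_eq_getElem _ _ hq3 (by simp only [List.length_set]; omega),
      List.getElem_set]
    by_cases hxx : q.2 = p.2
    · have h2 : p.2.toNat = q.2.toNat := by omega
      rw [if_pos h2, if_pos (by exact Prod.ext hyy hxx)]
    · have h2 : ¬ p.2.toNat = q.2.toNat := by omega
      rw [if_neg h2, if_neg (by intro h; exact hxx (congrArg Prod.snd h))]
      rw [PySem.List.pyGetD_eq_getElem _ _ hq1 (by omega),
        PySem.List.pyGetD_eq_getElem _ _ hq3 (by omega)]
      simp only [hnn]
  · have hnn : ¬ p.1.toNat = q.1.toNat := by omega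
    rw [if_neg hnn, if_neg (by intro h; exact hyy (congrArg Prod.fst h))]
    rw [PySem.List.pyGetD_eq_getElem _ _ hq1 (by omega)]

lemma StG_gridSet {g1 g : List (List Int)} {M : Set (Int × Int)} (hst : StG g1 M g)
    {p : Int × Int} (hp : inbP g1 p) :
    StG g1 (M ∪ {p}) (gridSet g p.1 p.2 (-1)) := by
  obtain ⟨hd, hv⟩ := hst
  refine ⟨dimsEq_gridSet hd p (-1), fun q hq => ?_⟩
  rw [valP_gridSet hd hp q hq (-1)]
  constructor
  · intro hm
    by_cases hqp : q = p
    · rw [if_pos hqp]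
    · rw [if_neg hqp]
      exact (hv q hq).1 (hm.resolve_right (by simpa using hqp))
  · intro hm
    rw [if_neg (by intro h; exact hm (Or.inr (by simpa using h)))]
    exact (hv q hq).2 (fun h => hm (Or.inl h))

lemma muG_le (g : List (List Int)) : muG g ≤ (g.map List.length).sum := by
  unfold muG
  induction g with
  | nil => simp
  | cons r rs ih =>
    simp only [List.map, List.sum_cons]
    exact Nat.add_le_add List.countP_le_length ih

lemma dimsEq_map_length {g1 g : List (List Int)} (hd : dimsEq g1 g) :
    (g.map List.length).sum = (g1.map List.length).sum := by
  obtain ⟨hl, hr⟩ := hd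
  congr 1
  apply List.ext_getElem (by simpa using hl)
  intro i h1 h2
  simp only [List.length_map] at h1 h2
  simp only [List.getElem_map]
  have := hr i h2
  rwa [rowOf_eq_getElem g i (by omega), rowOf_eq_getElem g1 i h2] at this

lemma muG_gridSet_key {g1 g : List (List Int)} (hd : dimsEq g1 g) {p : Int × Int}
    (hp : inbP g1 p) :
    muG (gridSet g p.1 p.2 (-1)) + (if valP g p ≠ -1 then 1 else 0) = muG g := by
  obtain ⟨hp1, hp2, hp3, hp4⟩ := hp
  have hlen : g.length = g1.length := hd.1
  have hpi : p.1.toNat < g.length := by omega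
  have hcastp : ((p.1.toNat : Nat) : Int) = p.1 := by omega
  have hrowp : (g[p.1.toNat]).length = (rowOf g1 p.1).length := by
    have h2 := hd.2 p.1.toNat (by omega)
    rw [rowOf_eq_getElem g _ hpi, hcastp] at h2
    exact h2
  have hpj : p.2.toNat < (g[p.1.toNat]).length := by omega
  have hval : valP g p = (g[p.1.toNat])[p.2.toNat] := by
    unfold valP rowOf
    rw [PySem.List.pyGetD_eq_getElem _ _ hp1 (by omega),
      PySem.List.pyGetD_eq_getElem _ _ hp3 (by omega)]
  rw [gridSet_eq_set g p.1 p.2 (-1) hp1 (by omega) hp3]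
  unfold muG
  have hsum := sum_map_set (fun r => r.countP (fun v => !(v == -1))) g p.1.toNat
    ((g[p.1.toNat]).set p.2.toNat (-1)) hpi
  have hcnt := countP_set' (fun v => !(v == -1)) (g[p.1.toNat]) p.2.toNat (-1) hpj
  simp only [hval]
  by_cases hv : (g[p.1.toNat])[p.2.toNat] = -1
  · simp only [hv, ne_eq, not_true_eq_false, if_false]
    simp only [hv] at hcnt
    simp at hcnt
    omega
  · have hb : (!((g[p.1.toNat])[p.2.toNat] == -1)) = true := by simp [hv]
    simp only [ne_eq, hv, not_false_eq_true, if_true]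
    rw [hb] at hcnt
    simp at hcnt
    omega

lemma muG_gridSet_le {g1 g : List (List Int)} (hd : dimsEq g1 g) {p : Int × Int}
    (hp : inbP g1 p) : muG (gridSet g p.1 p.2 (-1)) ≤ muG g := by
  have := muG_gridSet_key hd hp
  omega

lemma muG_gridSet_lt {g1 g : List (List Int)} (hd : dimsEq g1 g) {p : Int × Int}
    (hp : inbP g1 p) (hv : valP g p ≠ -1) :
    muG (gridSet g p.1 p.2 (-1)) < muG g := by
  have := muG_gridSet_key hd hp
  rw [if_pos hv] at this
  omega

lemma inbP_congr {g1 g : List (List Int)} (hd : dimsEq g1 g) (p : Int × Int) :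
    inbP g p ↔ inbP g1 p := by
  unfold inbP
  obtain ⟨hl, hr⟩ := hd
  constructor
  · rintro ⟨h1, h2, h3, h4⟩
    refine ⟨h1, by omega, h3, ?_⟩
    have hc : ((p.1.toNat : Nat) : Int) = p.1 := by omega
    have := hr p.1.toNat (by omega)
    rw [hc] at this
    omega
  · rintro ⟨h1, h2, h3, h4⟩
    refine ⟨h1, by omega, h3, ?_⟩
    have hc : ((p.1.toNat : Nat) : Int) = p.1 := by omega
    have := hr p.1.toNat (by omega)
    rw [hc] at this
    omega

lemma inBoundsA_iff {g1 g : List (List Int)} (hd : dimsEq g1 g) (y x : Int) :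
    inBoundsA g y x = true ↔ inbP g1 (y, x) := by
  rw [← inbP_congr hd (y, x)]
  unfold inBoundsA inbP rowOf
  rcases h : PySem.List.pyGet? g y with _ | row
  · simp only [Bool.false_eq_true, false_iff]
    rw [PySem.List.pyGet?_eq_none_iff] at h
    simp only [PySem.Raise.InRange, not_and] at h
    rintro ⟨h1, h2, h3, h4⟩
    have := h (by omega)
    omega
  · simp only [Bool.and_eq_true, decide_eq_true_eq]
    constructor
    · rintro ⟨⟨h1, h2⟩, h3, h4⟩
      refine ⟨h3, h4, h1, ?_⟩
      have hy' : 0 ≤ y := h3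
      rw [PySem.List.pyGet?_of_nonneg g hy', List.getElem?_eq_getElem (by omega)] at h
      have hrow : row = g[y.toNat] := by injection h with he; exact he.symm
      rw [PySem.List.pyGetD_eq_getElem _ _ hy' (by omega)]
      rwa [hrow] at h2
    · rintro ⟨h1, h2, h3, h4⟩
      refine ⟨⟨h3, ?_⟩, h1, h2⟩
      rw [PySem.List.pyGet?_of_nonneg g h1, List.getElem?_eq_getElem (by omega)] at h
      have hrow : row = g[y.toNat] := by injection h with he; exact he.symm
      rw [PySem.List.pyGetD_eq_getElem _ _ h1 (by omega)] at h4
      rwa [← hrow] at h4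

lemma mem_susRabbits {g1 g : List (List Int)} {M : Set (Int × Int)} (hst : StG g1 M g)
    (strength y x : Int) (q : Int × Int) :
    q ∈ susRabbits g strength y x ↔ q ∈ nbrsP (y, x) ∧ eligP g1 strength q ∧ q ∉ M := by
  obtain ⟨hdim, hval⟩ := hst
  have hvv : ∀ p : Int × Int, cellA g p.1 p.2 = valP g p := fun _ => rfl
  rw [susRabbits, List.mem_filter]
  have hlist : q ∈ [(y, x-1), (y, x+1), (y-1, x), (y+1, x)] ↔ q ∈ nbrsP (y, x) := by
    simp [nbrsP]
  rw [hlist]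
  simp only [Bool.and_eq_true, Bool.not_eq_true', beq_eq_false_iff_ne, decide_eq_true_eq, hvv]
  constructor
  · rintro ⟨hmem, ⟨hb, hs⟩, hni⟩
    have hinb : inbP g1 q := by
      have := (inBoundsA_iff hdim q.1 q.2).mp hb
      simpa using this
    have hnm : q ∉ M := fun hm => hni ((hval _ hinb).1 hm)
    have heq := (hval _ hinb).2 hnm
    rw [heq] at hs hni
    exact ⟨hmem, ⟨hinb, hs, hni⟩, hnm⟩
  · rintro ⟨hmem, ⟨hinb, hs, hni⟩, hnm⟩
    have heq := (hval _ hinb).2 hnm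
    refine ⟨hmem, ⟨(inBoundsA_iff hdim q.1 q.2).mpr (by simpa using hinb), ?_⟩, ?_⟩
    · rw [heq]; exact hs
    · rw [heq]; exact hni

lemma eligB_iff {g1 g : List (List Int)} {M : Set (Int × Int)} (hst : StG g1 M g)
    (strength y x : Int) :
    eligB g strength y x = true ↔ eligP g1 strength (y, x) ∧ (y, x) ∉ M := by
  obtain ⟨hdim, hval⟩ := hst
  have hvv : PySem.List.pyGetD (PySem.List.pyGetD g y []) x 0 = valP g (y, x) := rfl
  simp only [eligB, Bool.and_eq_true, decide_eq_true_eq, Bool.not_eq_true',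
    beq_eq_false_iff_ne, hvv]
  constructor
  · rintro ⟨h1, h2, h3, h4⟩
    have hinb : inbP g1 (y, x) := (inbP_congr hdim (y, x)).mp ⟨h1.1, h1.2, h2.1, h2.2⟩
    have hnm : (y, x) ∉ M := fun hm => h3 ((hval _ hinb).1 hm)
    have heq := (hval _ hinb).2 hnm
    rw [heq] at h3 h4
    exact ⟨⟨hinb, h4, h3⟩, hnm⟩
  · rintro ⟨⟨hinb, hs, hni⟩, hnm⟩
    have heq := (hval _ hinb).2 hnm
    obtain ⟨a, b, c, d⟩ := (inbP_congr hdim (y, x)).mpr hinb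
    refine ⟨⟨a, b⟩, ⟨c, d⟩, ?_, ?_⟩
    · rw [heq]; exact hni
    · rw [heq]; exact hs

lemma reach_subset_of_closed {g1 : List (List Int)} {strength : Int} {s : Int × Int}
    {M : Set (Int × Int)} (hs : s ∈ M)
    (hcl : ∀ r ∈ M, ∀ q ∈ nbrsP r, eligP g1 strength q → q ∈ M) :
    ∀ r, ReachP g1 strength s r → r ∈ M := by
  intro r h
  induction h with
  | base => exact hs
  | step h1 h2 h3 ih => exact hcl _ ih _ h2 h3

-- main invariant lemma for port A's recursion
lemma spreadA_spec (g1 : List (List Int)) (strength : Int) (s : Int × Int) :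
    ∀ n (g : List (List Int)) (M : Set (Int × Int)) (p : Int × Int),
    muG g + 1 ≤ n → StG g1 M g → (∀ r ∈ M, ReachP g1 strength s r) → p ∈ M →
    ∃ M', StG g1 M' (spreadA strength n g p.1 p.2) ∧ M ⊆ M' ∧
      (∀ r ∈ M', ReachP g1 strength s r) ∧
      (∀ q ∈ nbrsP p, eligP g1 strength q → q ∈ M') ∧
      (∀ r ∈ M', r ∉ M → ∀ q ∈ nbrsP r, eligP g1 strength q → q ∈ M') ∧
      muG (spreadA strength n g p.1 p.2) ≤ muG g := by
  intro n
  induction n with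
  | zero => intro g M p hfuel; omega
  | succ n ih =>
    intro g M p hfuel hst hreach hpM
    have hfold : ∀ (vs : List (Int × Int)),
        (∀ v ∈ vs, eligP g1 strength v ∧ v ∉ M ∧ ReachP g1 strength s v) →
        ∀ (gc : List (List Int)) (Mc : Set (Int × Int)),
        StG g1 Mc gc → M ⊆ Mc → (∀ r ∈ Mc, ReachP g1 strength s r) →
        muG gc ≤ muG g →
        ((∀ r ∈ Mc, inbP g1 r → r ∈ M) ∨ muG gc < muG g) →
        (∀ r ∈ Mc, r ∉ M → ∀ q ∈ nbrsP r, eligP g1 strength q → q ∈ Mc) →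
        ∃ M', StG g1 M'
            (vs.foldl (fun gc' q => spreadA strength n (gridSet gc' q.1 q.2 (-1)) q.1 q.2) gc) ∧
          Mc ⊆ M' ∧ (∀ r ∈ M', ReachP g1 strength s r) ∧ (∀ v ∈ vs, v ∈ M') ∧
          (∀ r ∈ M', r ∉ M → ∀ q ∈ nbrsP r, eligP g1 strength q → q ∈ M') ∧
          muG (vs.foldl (fun gc' q => spreadA strength n (gridSet gc' q.1 q.2 (-1)) q.1 q.2) gc) ≤ muG gc := by
      intro vs
      induction vs with
      | nil =>
        intro _ gc Mc h1 _ h3 _ _ h6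
        exact ⟨Mc, h1, subset_refl _, h3, by simp, h6, le_refl _⟩
      | cons v rest ihv =>
        intro hvs gc Mc hstc hMc hreachc hmu hJ hclosed
        obtain ⟨hv_elig, hv_nm, hv_reach⟩ := hvs v (List.mem_cons_self ..)
        simp only [List.foldl_cons]
        have hdimc : dimsEq g1 gc := hstc.1
        have hstm : StG g1 (Mc ∪ {v}) (gridSet gc v.1 v.2 (-1)) := StG_gridSet hstc hv_elig.1
        have hmum : muG (gridSet gc v.1 v.2 (-1)) < muG g := by
          by_cases hvMc : v ∈ Mc
          · rcases hJ with hL | hR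
            · exact absurd (hL v hvMc hv_elig.1) hv_nm
            · have := muG_gridSet_le hdimc hv_elig.1
              omega
          · have hvval : valP gc v ≠ -1 := by
              rw [(hstc.2 v hv_elig.1).2 hvMc]; exact hv_elig.2.2
            have := muG_gridSet_lt hdimc hv_elig.1 hvval
            omega
        have hreachm : ∀ r ∈ Mc ∪ {v}, ReachP g1 strength s r := by
          rintro r (hr | hr)
          · exact hreachc r hr
          · rw [Set.mem_singleton_iff] at hr; rw [hr]; exact hv_reach
        obtain ⟨Mr, hstr, hsubr, hreachr, hnbrv, hclr, hmur⟩ :=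
          ih (gridSet gc v.1 v.2 (-1)) (Mc ∪ {v}) v (by omega) hstm hreachm (Or.inr rfl)
        have hclosed_r : ∀ r ∈ Mr, r ∉ M → ∀ q ∈ nbrsP r, eligP g1 strength q → q ∈ Mr := by
          intro r hrM hrnM q hq he
          by_cases hrc : r ∈ Mc
          · exact hsubr (Or.inl (hclosed r hrc hrnM q hq he))
          · by_cases hrv : r = v
            · subst hrv; exact hnbrv q hq he
            · refine hclr r hrM ?_ q hq he
              rintro (h | h)
              · exact hrc h
              · exact hrv (by simpa using h)
        obtain ⟨M', hst', hsub', hreach', hmemrest, hcl', hmu'⟩ :=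
          ihv (fun w hw => hvs w (List.mem_cons_of_mem _ hw))
            (spreadA strength n (gridSet gc v.1 v.2 (-1)) v.1 v.2) Mr hstr
            (hMc.trans ((Set.subset_union_left).trans hsubr))
            hreachr (by omega) (Or.inr (by omega)) hclosed_r
        refine ⟨M', hst', ((Set.subset_union_left).trans hsubr).trans hsub', hreach', ?_, hcl', ?_⟩
        · intro w hw
          rcases List.mem_cons.mp hw with hw | hw
          · subst hw; exact hsub' (hsubr (Or.inr rfl))
          · exact hmemrest w hw
        · have := muG_gridSet_le hdimc hv_elig.1
          omega
    have hvs0 : ∀ v ∈ susRabbits g strength p.1 p.2,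
        eligP g1 strength v ∧ v ∉ M ∧ ReachP g1 strength s v := by
      intro v hv
      obtain ⟨hn, he, hm⟩ := (mem_susRabbits hst strength p.1 p.2 v).mp hv
      exact ⟨he, hm, ReachP.step (hreach p hpM) hn he⟩
    obtain ⟨M', hst', hsub', hreach', hvsmem, hcl', hmu'⟩ :=
      hfold (susRabbits g strength p.1 p.2) hvs0 g M hst (subset_refl _) hreach (le_refl _)
        (Or.inl (fun r hr _ => hr)) (fun r hr hnr => absurd hr hnr)
    refine ⟨M', ?_, hsub', hreach', ?_, hcl', ?_⟩
    · simpa only [spreadA] using hst'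
    · intro q hq he
      by_cases hm : q ∈ M
      · exact hsub' hm
      · exact hvsmem q ((mem_susRabbits hst strength p.1 p.2 q).mpr ⟨hq, he, hm⟩)
    · simpa only [spreadA] using hmu'

-- main invariant lemma for port B's loop
lemma loopB_spec (g1 : List (List Int)) (strength : Int) (s : Int × Int) :
    ∀ n (g : List (List Int)) (stack : List (Int × Int)) (M : Set (Int × Int)),
    muG g + stack.length + 1 ≤ n → StG g1 M g → (∀ p ∈ stack, p ∈ M) →
    (∀ r ∈ M, ReachP g1 strength s r) →
    (∀ r ∈ M, r ∉ stack → ∀ q ∈ nbrsP r, eligP g1 strength q → q ∈ M) →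
    ∃ M', StG g1 M' (loopB strength n g stack) ∧ M ⊆ M' ∧
      (∀ r ∈ M', ReachP g1 strength s r) ∧
      (∀ r ∈ M', ∀ q ∈ nbrsP r, eligP g1 strength q → q ∈ M') := by
  intro n
  induction n with
  | zero => intro g stack M hfuel; omega
  | succ n ih =>
    intro g stack M hfuel hst hstM hreach hclosed
    match stack with
    | [] =>
      exact ⟨M, hst, subset_refl _, hreach,
        fun r hr => hclosed r hr (by simp)⟩
    | (y, x) :: rest =>
      simp only [loopB]
      have hyxM : (y, x) ∈ M := hstM (y, x) (List.mem_cons_self ..)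
      have hinner : ∀ (ns : List (Int × Int)),
          (∀ q ∈ ns, eligP g1 strength q → ReachP g1 strength s q) →
          ∀ (gc : List (List Int)) (st : List (Int × Int)) (Mc : Set (Int × Int)),
          StG g1 Mc gc → (∀ p ∈ st, p ∈ Mc) → (∀ r ∈ Mc, ReachP g1 strength s r) →
          M ⊆ Mc →
          muG gc + st.length ≤ muG g + rest.length →
          (∀ r ∈ Mc, r ∉ st → r ≠ (y, x) → ∀ q ∈ nbrsP r, eligP g1 strength q → q ∈ Mc) →
          ∃ Mc',
            StG g1 Mc' (ns.foldl (fun (st' : List (List Int) × List (Int × Int)) p =>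
              if eligB st'.1 strength p.1 p.2 then (gridSet st'.1 p.1 p.2 (-1), p :: st'.2) else st') (gc, st)).1 ∧
            Mc ⊆ Mc' ∧
            (∀ p ∈ (ns.foldl (fun (st' : List (List Int) × List (Int × Int)) p =>
              if eligB st'.1 strength p.1 p.2 then (gridSet st'.1 p.1 p.2 (-1), p :: st'.2) else st') (gc, st)).2, p ∈ Mc') ∧
            (∀ r ∈ Mc', ReachP g1 strength s r) ∧
            (∀ q ∈ ns, eligP g1 strength q → q ∈ Mc') ∧
            (∀ p ∈ st, p ∈ (ns.foldl (fun (st' : List (List Int) × List (Int × Int)) p =>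
              if eligB st'.1 strength p.1 p.2 then (gridSet st'.1 p.1 p.2 (-1), p :: st'.2) else st') (gc, st)).2) ∧
            muG (ns.foldl (fun (st' : List (List Int) × List (Int × Int)) p =>
              if eligB st'.1 strength p.1 p.2 then (gridSet st'.1 p.1 p.2 (-1), p :: st'.2) else st') (gc, st)).1 +
              ((ns.foldl (fun (st' : List (List Int) × List (Int × Int)) p =>
              if eligB st'.1 strength p.1 p.2 then (gridSet st'.1 p.1 p.2 (-1), p :: st'.2) else st') (gc, st)).2).length ≤
              muG gc + st.length ∧
            (∀ r ∈ Mc', r ∉ (ns.foldl (fun (st' : List (List Int) × List (Int × Int)) p =>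
              if eligB st'.1 strength p.1 p.2 then (gridSet st'.1 p.1 p.2 (-1), p :: st'.2) else st') (gc, st)).2 →
              r ≠ (y, x) → ∀ q ∈ nbrsP r, eligP g1 strength q → q ∈ Mc') := by
        intro ns
        induction ns with
        | nil =>
          intro _ gc st Mc h1 h2 h3 h4 h5 h6
          simp only [List.foldl_nil]
          exact ⟨Mc, h1, subset_refl _, h2, h3, by simp, fun p hp => hp, le_refl _, h6⟩
        | cons q qs ihn =>
          intro hns gc st Mc hstc hstMc hreachc hMMc hmuc hclc
          simp only [List.foldl_cons]
          by_cases hb : eligB gc strength q.1 q.2 = true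
          · rw [if_pos hb]
            obtain ⟨helig, hnm⟩ := (eligB_iff hstc strength q.1 q.2).mp hb
            have hstm : StG g1 (Mc ∪ {q}) (gridSet gc q.1 q.2 (-1)) := by
              have := StG_gridSet hstc (p := (q.1, q.2)) helig.1
              simpa using this
            have hvval : valP gc (q.1, q.2) ≠ -1 := by
              rw [(hstc.2 (q.1, q.2) helig.1).2 (by simpa using hnm)]
              exact helig.2.2
            have hmu1 : muG (gridSet gc q.1 q.2 (-1)) < muG gc := by
              have := muG_gridSet_lt hstc.1 (p := (q.1, q.2)) helig.1 hvval
              simpa using this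
            have hreach_q : ReachP g1 strength s q :=
              hns q (List.mem_cons_self ..) (by simpa using helig)
            obtain ⟨Mc', ha, hb2, hc, hd, he, hf, hg, hh⟩ :=
              ihn (fun w hw hwe => hns w (List.mem_cons_of_mem _ hw) hwe)
                (gridSet gc q.1 q.2 (-1)) (q :: st) (Mc ∪ {q}) hstm
                (by
                  intro p hp
                  rcases List.mem_cons.mp hp with hp | hp
                  · exact Or.inr (by simpa using hp)
                  · exact Or.inl (hstMc p hp))
                (by
                  rintro r (hr | hr)
                  · exact hreachc r hr
                  · rw [Set.mem_singleton_iff] at hr; rw [hr]; exact hreach_q)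
                (hMMc.trans Set.subset_union_left)
                (by simp only [List.length_cons]; omega)
                (by
                  rintro r (hr | hr) hrs hryx qq hq he2
                  · exact Or.inl (hclc r hr (fun h => hrs (List.mem_cons_of_mem _ h)) hryx qq hq he2)
                  · rw [Set.mem_singleton_iff] at hr
                    exact absurd (hr ▸ List.mem_cons_self ..) hrs)
            refine ⟨Mc', ha, Set.subset_union_left.trans hb2, hc, hd, ?_, ?_, ?_, hh⟩
            · intro w hw hwe
              rcases List.mem_cons.mp hw with hw | hw
              · subst hw; exact hb2 (Or.inr rfl)
              · exact he w hw hwe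
            · intro p hp
              exact hf p (List.mem_cons_of_mem _ hp)
            · simp only [List.length_cons] at hg
              omega
          · rw [if_neg hb]
            obtain ⟨Mc', ha, hb2, hc, hd, he, hf, hg, hh⟩ :=
              ihn (fun w hw hwe => hns w (List.mem_cons_of_mem _ hw) hwe)
                gc st Mc hstc hstMc hreachc hMMc hmuc hclc
            refine ⟨Mc', ha, hb2, hc, hd, ?_, hf, hg, hh⟩
            intro w hw hwe
            rcases List.mem_cons.mp hw with hw | hw
            · subst hw
              have : w ∈ Mc := by
                by_contra hnm
                exact hb ((eligB_iff hstc strength w.1 w.2).mpr ⟨by simpa using hwe, by simpa using hnm⟩)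
              exact hb2 this
            · exact he w hw hwe
      obtain ⟨Mc', ha, hb2, hc, hd, he, hf, hg, hh⟩ :=
        hinner [(y, x-1), (y, x+1), (y-1, x), (y+1, x)]
          (fun q hq hqe => ReachP.step (hreach (y, x) hyxM) (by simpa [nbrsP] using hq) hqe)
          g rest M hst
          (fun p hp => hstM p (List.mem_cons_of_mem _ hp))
          hreach (subset_refl _) (le_refl _)
          (fun r hr hrs hryx => hclosed r hr (by
            intro hmem
            rcases List.mem_cons.mp hmem with h | h
            · exact hryx h
            · exact hrs h))
      obtain ⟨M', h1, h2, h3, h4⟩ :=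
        ih _ _ Mc' (by simp only [List.length_cons] at hfuel; omega) ha hc hd
          (by
            intro r hr hrs qq hq he2
            by_cases hryx : r = (y, x)
            · subst hryx
              exact he qq (by simpa [nbrsP] using hq) he2
            · exact hh r hr hrs hryx qq hq he2)
      exact ⟨M', h1, hb2.trans h2, h3, h4⟩

-- ===== VERDICT (by name: the statement is the Claim_ definition above) =====
lemma dimsEq_symm {g1 g2 : List (List Int)} (h : dimsEq g1 g2) : dimsEq g2 g1 := by
  obtain ⟨hl, hr⟩ := h
  exact ⟨hl.symm, fun i hi => (hr i (by omega)).symm⟩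

theorem answer_spec : Claim_equal_answer := by
  intro population patient_x patient_y strength hdom hpre
  unfold Spec_answer
  rcases hm : (PySem.List.pyGet? population patient_y).bind
      (fun r => PySem.List.pyGet? r patient_x) with _ | r
  · rw [Pre_answer, hm] at hpre
    simp at hpre
  · simp only [answer, answer_alt, hm]
    by_cases hr : r ≤ strength
    · rw [if_pos hr, if_pos hr]
      set s : Int × Int := (patient_y, patient_x) with hs
      set g1 : List (List Int) := gridSet population patient_y patient_x (-1) with hg1
      have hdims : dimsEq population g1 := dimsEq_gridSet_self population patient_y patient_x (-1)
      have hst : StG g1 {s} g1 := by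
        refine ⟨dimsEq_refl g1, fun p hp => ?_⟩
        refine ⟨?_, fun _ => rfl⟩
        intro hm2
        rw [Set.mem_singleton_iff] at hm2
        subst hm2
        have hps : inbP g1 s := hp
        have := valP_gridSet (dimsEq_symm hdims) (p := s) hps s hps (-1)
        rw [if_pos rfl] at this
        exact this
      have hsum : (g1.map List.length).sum = (population.map List.length).sum :=
        dimsEq_map_length hdims
      have hmu : muG g1 ≤ (population.map List.length).sum :=
        le_trans (muG_le g1) (le_of_eq hsum)
      have hsingle : ∀ r ∈ ({s} : Set (Int × Int)), ReachP g1 strength s r := by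
        intro r hr2
        rw [Set.mem_singleton_iff] at hr2
        rw [hr2]
        exact ReachP.base
      obtain ⟨MA, hstA, hsubA, hreachA, hnbrA, hclA, _⟩ :=
        spreadA_spec g1 strength s ((population.map List.length).sum + 2) g1 {s} s
          (by omega) hst hsingle (Set.mem_singleton s)
      obtain ⟨MB, hstB, hsubB, hreachB, hclB⟩ :=
        loopB_spec g1 strength s ((population.map List.length).sum + 2) g1 [s] {s}
          (by simp only [List.length_singleton]; omega) hst
          (by
            intro p hp
            rcases List.mem_cons.mp hp with hp | hp
            · rw [hp]; exact Set.mem_singleton s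
            · simp at hp)
          hsingle
          (by
            intro r2 hr2 hrs
            rw [Set.mem_singleton_iff] at hr2
            exact absurd (by rw [hr2]; exact List.mem_cons_self ..) hrs)
      have hMA : MA = {r | ReachP g1 strength s r} := by
        apply Set.Subset.antisymm
        · exact fun r2 hr2 => hreachA r2 hr2
        · intro r2 hr2
          refine reach_subset_of_closed (hsubA (Set.mem_singleton s)) ?_ r2 hr2
          intro r3 hr3 q hq he
          by_cases hrs : r3 = s
          · subst hrs; exact hnbrA q hq he
          · exact hclA r3 hr3 (by simpa using hrs) q hq he
      have hMB : MB = {r | ReachP g1 strength s r} := by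
        apply Set.Subset.antisymm
        · exact fun r2 hr2 => hreachB r2 hr2
        · exact fun r2 hr2 =>
            reach_subset_of_closed (hsubB (Set.mem_singleton s)) hclB r2 hr2
      rw [hMA] at hstA
      rw [hMB] at hstB
      exact StG_unique hstA hstB
    · rw [if_neg hr, if_neg hr]
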